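-- pv_equiv track=rewrite | github.com/yuxinghuo/mars-leetcode | leetcode/huawei01.py | huaweilianxuzimulength
-- ===== SOURCE A (Python) =====
-- def huaweilianxuzimulength(s: str, k: int) -> int:
--     # 初始化26个字母的计数器
--     counts = [0] * 26
--
--     if not s:  # 处理空字符串情况
--         return 0
--
--     left = 0
--     right = 1
--
--     while left < len(s) and right <= len(s):
--         if right < len(s) and s[left] == s[right]:
--             right += 1
--         else:
--             char_index = ord(s[left]) - ord('A')
--             current_length = right - left
--             if current_length > counts[char_index]:
--                 counts[char_index] = current_length
--             left = right
--             right += 1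
--
--     # 降序排序并返回第k大的值
--     counts.sort(reverse=True)
--
--     # 处理k超出范围的情况
--     if k > len(counts):
--         return 0
--     return counts[k - 1]
-- ===== SOURCE B (Python) =====
-- def huaweilianxuzimulength(s: str, k: int) -> int:
--     counts = [0] * 26
--     for ch in set(s):
--         best = cur = 0
--         for c in s:
--             cur = cur + 1 if c == ch else 0
--             best = max(best, cur)
--         i = ord(ch) - ord('A')
--         counts[i] = max(counts[i], best)
--     counts.sort(reverse=True)
--     return 0 if k > 26 else counts[k - 1]
-- ===== Notes on version B (the rewrite author's own statement) =====
-- stated objective: alternative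
-- what changed: Replaces A's single two-pointer run scan that closes runs into the array with one independent longest-run scan of s per distinct character (no run enumeration, no left/right pointers), writing each character's longest run into counts with the same Python list indexing, then the same sort-descending / k-th tail; order over set(s) is irrelevant because only per-slot maxima are kept.
-- outside the precondition, e.g. on huaweilianxuzimulength('', -30): A returns 0, B raises IndexError
import Mathlib
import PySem

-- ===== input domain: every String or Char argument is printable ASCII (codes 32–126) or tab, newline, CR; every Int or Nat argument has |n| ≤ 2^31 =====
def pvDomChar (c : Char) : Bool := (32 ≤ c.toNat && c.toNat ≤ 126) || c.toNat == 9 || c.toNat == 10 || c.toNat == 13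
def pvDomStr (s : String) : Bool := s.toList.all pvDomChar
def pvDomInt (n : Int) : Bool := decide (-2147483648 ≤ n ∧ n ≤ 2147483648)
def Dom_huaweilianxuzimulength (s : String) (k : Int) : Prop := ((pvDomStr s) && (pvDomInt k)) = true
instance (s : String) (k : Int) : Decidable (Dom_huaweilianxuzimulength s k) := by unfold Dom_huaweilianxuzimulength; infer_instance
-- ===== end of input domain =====

-- B replaces A's two-pointer run scan by one independent longest-run scan of s per distinct character; return values only, no observable mutation.

-- ===== PORT A =====
-- while left < len(s) and right <= len(s): two-pointer scan; counts[ord(c)-65] (negative index wraps, out of range = IndexError = none)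
def pvLoopA (l : List Char) (n : Nat) (counts : List Int) (left right : Nat) : Option (List Int) :=
  if h : left < n ∧ right ≤ n then
    if right < n ∧ PySem.List.pyGet? l (left : Int) = PySem.List.pyGet? l (right : Int) then
      pvLoopA l n counts left (right + 1)
    else
      match PySem.List.pyGet? l (left : Int) with
      | none => none
      | some ch =>
        match PySem.List.pyGet? counts ((ch.toNat : Int) - 65) with
        | none => none
        | some cur =>
          let len : Int := (right : Int) - (left : Int)
          let counts' := if len > cur then PySem.List.pySetD counts ((ch.toNat : Int) - 65) len else counts
          pvLoopA l n counts' right (right + 1)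
  else some counts
termination_by n + 1 - right
decreasing_by all_goals omega

def huaweilianxuzimulength (s : String) (k : Int) : Int :=
  let counts0 : List Int := List.replicate 26 0
  let l := s.toList
  if l = [] then 0
  else
    match pvLoopA l l.length counts0 0 1 with
    | none => 0   -- IndexError (outside Pre_)
    | some counts =>
      let srt := PySem.List.sorted counts id true
      if k > PySem.List.len srt then 0
      else
        match PySem.List.pyGet? srt (k - 1) with
        | none => 0   -- IndexError (outside Pre_)
        | some v => v

-- ===== PORT B =====
-- inner loop of B: best = cur = 0; for c in s: cur = cur+1 if c == ch else 0; best = max(best, cur)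
def pvBest (ch : Char) (s : List Char) : Int :=
  (s.foldl (fun (p : Int × Int) c =>
      let cur := if c = ch then p.2 + 1 else 0
      (max p.1 cur, cur)) (0, 0)).1

-- for ch in set(s): counts[ord(ch)-65] = max(counts[ord(ch)-65], best)
def pvLoopC (counts : List Int) (chars : List Char) (s : List Char) : Option (List Int) :=
  match chars with
  | [] => some counts
  | ch :: rest =>
    let best := pvBest ch s
    match PySem.List.pyGet? counts ((ch.toNat : Int) - 65) with
    | none => none
    | some cur => pvLoopC (PySem.List.pySetD counts ((ch.toNat : Int) - 65) (max cur best)) rest s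

def huaweilianxuzimulength_alt (s : String) (k : Int) : Int :=
  match pvLoopC (List.replicate 26 0) (PySem.Set.ofList s.toList) s.toList with
  | none => 0   -- IndexError (outside Pre_)
  | some counts =>
    let srt := PySem.List.sorted counts id true
    if k > 26 then 0
    else
      match PySem.List.pyGet? srt (k - 1) with
      | none => 0   -- IndexError (outside Pre_)
      | some v => v

-- ===== PRECONDITION & SPEC =====
-- Pre_ excludes inputs where counts[ord(c)-65] or counts[k-1] is an out-of-range index and both programs
-- raise IndexError: a character outside codes 39..90, or k < -25 — except that on the empty string with
-- k < -25 A's early return yields 0 while B raises, so those inputs are excluded too (see cites).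
def Pre_huaweilianxuzimulength (s : String) (k : Int) : Prop :=
  (s.toList.all (fun c => 39 ≤ c.toNat && c.toNat ≤ 90)) = true ∧ -25 ≤ k
instance (s : String) (k : Int) : Decidable (Pre_huaweilianxuzimulength s k) := by
  unfold Pre_huaweilianxuzimulength; infer_instance

def pvWitness_huaweilianxuzimulength : String × Int := ("AABZZZ", 2)

def Spec_huaweilianxuzimulength (s : String) (k : Int) (out : Int) : Prop := out = huaweilianxuzimulength_alt s k
instance (s : String) (k : Int) (out : Int) : Decidable (Spec_huaweilianxuzimulength s k out) := by unfold Spec_huaweilianxuzimulength; infer_instance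

-- ===== CLAIM (what is proved, stated in full; the proofs are below) =====
def Claim_equal_huaweilianxuzimulength : Prop := ∀ (s : String) (k : Int), Dom_huaweilianxuzimulength s k → Pre_huaweilianxuzimulength s k → Spec_huaweilianxuzimulength s k (huaweilianxuzimulength s k)

-- ===== LEMMAS AND PROOFS =====

-- Normalized index: a Python index i that is in range names the physical slot j.
lemma pv_idx (len : Nat) (i : Int) (h0 : -(len : Int) ≤ i) (h1 : i < (len : Int)) :
    ∃ j : Nat, j < len ∧ PySem.List.pyIdx? len i = some j := by
  unfold PySem.List.pyIdx?
  by_cases hi : 0 ≤ i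
  · exact ⟨i.toNat, by omega, by simp [hi, h1]⟩
  · refine ⟨len - (-i).toNat, by omega, ?_⟩
    simp only [hi, if_false, h0, if_true]

lemma pv_get (xs : List Int) {i : Int} {j : Nat} (hj : j < xs.length)
    (h : PySem.List.pyIdx? xs.length i = some j) :
    PySem.List.pyGet? xs i = some (xs.getD j 0) := by
  simp [PySem.List.pyGet?, h, List.getElem?_eq_getElem hj, List.getD_eq_getElem?_getD]

lemma pv_set (xs : List Int) {i : Int} {j : Nat} (v : Int)
    (h : PySem.List.pyIdx? xs.length i = some j) :
    PySem.List.pySetD xs i v = xs.set j v := by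
  simp [PySem.List.pySetD, PySem.List.pySet?, h]

lemma pv_set_getD_self (xs : List Int) {j : Nat} (hj : j < xs.length) :
    xs.set j (xs.getD j 0) = xs := by
  apply List.ext_getElem (by simp)
  intro n h1 h2
  rw [List.getElem_set]
  split
  · next h => subst h; rw [List.getD_eq_getElem xs 0 hj]
  · rfl

lemma pv_step (xs : List Int) {i : Int} {j : Nat} (hj : j < xs.length)
    (hidx : PySem.List.pyIdx? xs.length i = some j) (v : Int) :
    (if v > xs.getD j 0 then PySem.List.pySetD xs i v else xs) = xs.set j (max (xs.getD j 0) v) := by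
  rw [pv_set xs v hidx]
  by_cases h : v > xs.getD j 0
  · rw [if_pos h, max_eq_right h.le]
  · rw [if_neg h, max_eq_left (not_lt.1 h), pv_set_getD_self xs hj]

lemma pv_getD (xs : List Int) {i : Int} {j : Nat} (hj : j < xs.length)
    (hidx : PySem.List.pyIdx? xs.length i = some j) :
    PySem.List.pyGetD xs i 0 = xs.getD j 0 := by
  simp [PySem.List.pyGetD, pv_get xs hj hidx]

lemma pv_getD_set (xs : List Int) {j : Nat} (hj : j < xs.length) (v : Int) :
    (xs.set j v).getD j 0 = v := by
  rw [List.getD_eq_getElem _ 0 (by simpa using hj), List.getElem_set_self]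

lemma pv_getD_set_ne (xs : List Int) {i j : Nat} (h : i ≠ j) (v : Int) :
    (xs.set i v).getD j 0 = xs.getD j 0 := by
  simp [List.getD_eq_getElem?_getD, List.getElem?_set_ne h]

-- proof-side reference: the single forward pass with (prev char, current run length)
def pvRef (counts : List Int) (prev : Option Char) (run : Int) (l : List Char) : Option (List Int) :=
  match l with
  | [] => some counts
  | c :: rest =>
    let run' := if some c = prev then run + 1 else 1
    match PySem.List.pyGet? counts ((c.toNat : Int) - 65) with
    | none => none
    | some cur =>
      let counts' := if run' > cur then PySem.List.pySetD counts ((c.toNat : Int) - 65) run' else counts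
      pvRef counts' (some c) run' rest

-- physical slot of a character (total helper; meaningful for codes 39..90)
def pvSlot (c : Char) : Nat := (PySem.List.pyIdx? 26 ((c.toNat : Int) - 65)).getD 0

lemma pv_slot {c : Char} (hc : 39 ≤ c.toNat ∧ c.toNat ≤ 90) :
    PySem.List.pyIdx? 26 ((c.toNat : Int) - 65) = some (pvSlot c) ∧ pvSlot c < 26 := by
  obtain ⟨j, hj, h⟩ := pv_idx 26 ((c.toNat : Int) - 65) (by omega) (by omega)
  have : pvSlot c = j := by simp [pvSlot, h]
  exact ⟨this ▸ h, this ▸ hj⟩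

-- total versions of the two loops (chars in range)
def pvRefT (counts : List Int) (prev : Option Char) (run : Int) : List Char → List Int
  | [] => counts
  | c :: rest =>
    let run' := if some c = prev then run + 1 else 1
    pvRefT (counts.set (pvSlot c) (max (counts.getD (pvSlot c) 0) run')) (some c) run' rest

def pvApplyT (counts : List Int) (s : List Char) : List Char → List Int
  | [] => counts
  | ch :: rest => pvApplyT (counts.set (pvSlot ch) (max (counts.getD (pvSlot ch) 0) (pvBest ch s))) s rest

-- max-over-positions of the running run-length; max over a list of characters
def pvM (j : Nat) (prev : Option Char) (run : Int) : List Char → Int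
  | [] => 0
  | c :: rest =>
    let run' := if some c = prev then run + 1 else 1
    max (if pvSlot c = j then run' else 0) (pvM j (some c) run' rest)

def pvFmax (f : Char → Int) : List Char → Int
  | [] => 0
  | ch :: rest => max (f ch) (pvFmax f rest)

-- per-character run scan with carried current-run state
def pvAux (ch : Char) (cur : Int) : List Char → Int
  | [] => 0
  | c :: rest =>
    let cur' := if c = ch then cur + 1 else 0
    max cur' (pvAux ch cur' rest)

lemma pvM_nonneg (j : Nat) (prev : Option Char) (run : Int) (l : List Char) : 0 ≤ pvM j prev run l := by
  induction l generalizing prev run with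
  | nil => simp [pvM]
  | cons c rest ih => simpa [pvM] using Or.inr (ih _ _)

lemma pvFmax_nonneg (f : Char → Int) (L : List Char) : 0 ≤ pvFmax f L := by
  induction L with
  | nil => simp [pvFmax]
  | cons ch rest ih => simpa [pvFmax] using Or.inr ih

lemma pvAux_nonneg (ch : Char) (cur : Int) (l : List Char) : 0 ≤ pvAux ch cur l := by
  induction l generalizing cur with
  | nil => simp [pvAux]
  | cons c rest ih => simpa [pvAux] using Or.inr (ih _)

lemma pvFmax_congr {f g : Char → Int} (L : List Char) (h : ∀ ch ∈ L, f ch = g ch) :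
    pvFmax f L = pvFmax g L := by
  induction L with
  | nil => rfl
  | cons ch rest ih =>
    simp only [pvFmax]
    rw [h ch List.mem_cons_self, ih (fun x hx => h x (List.mem_cons_of_mem _ hx))]

lemma pvFmax_split {f g : Char → Int} {c : Char} {x : Int} (L : List Char)
    (hmem : c ∈ L) (hnd : L.Nodup) (hne : ∀ ch, ch ≠ c → f ch = g ch) (hc : f c = max x (g c)) :
    pvFmax f L = max x (pvFmax g L) := by
  induction L with
  | nil => cases hmem
  | cons d rest ih =>
    rcases List.mem_cons.mp hmem with rfl | hmem'
    · have hnotin : c ∉ rest := (List.nodup_cons.mp hnd).1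
      have : pvFmax f rest = pvFmax g rest :=
        pvFmax_congr rest (fun x hx => hne x (fun hxc => hnotin (hxc ▸ hx)))
      simp only [pvFmax, this, hc]
      rw [max_assoc]
    · have hdc : d ≠ c := fun h => ((List.nodup_cons.mp hnd).1 (h ▸ hmem')).elim
      simp only [pvFmax, hne d hdc, ih hmem' (List.nodup_cons.mp hnd).2]
      rw [max_left_comm]

lemma pvFmax_zero {f : Char → Int} (L : List Char) (h : ∀ ch ∈ L, f ch = 0) : pvFmax f L = 0 := by
  induction L with
  | nil => rfl
  | cons ch rest ih =>
    simp only [pvFmax, h ch List.mem_cons_self,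
      ih (fun x hx => h x (List.mem_cons_of_mem _ hx)), max_self]

lemma pvBest_fold (ch : Char) : ∀ (l : List Char) (b c : Int), 0 ≤ b →
    (l.foldl (fun (p : Int × Int) c0 =>
        let cur := if c0 = ch then p.2 + 1 else 0
        (max p.1 cur, cur)) (b, c)).1 = max b (pvAux ch c l) := by
  intro l
  induction l with
  | nil => intro b c hb; simp [pvAux, max_eq_left hb]
  | cons c0 rest ih =>
    intro b c hb
    simp only [List.foldl_cons, pvAux]
    rw [ih _ _ (le_max_of_le_left hb), max_assoc]

lemma pvBest_eq_aux (ch : Char) (l : List Char) : pvBest ch l = pvAux ch 0 l := by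
  unfold pvBest
  rw [pvBest_fold ch l 0 0 le_rfl, max_eq_right (pvAux_nonneg ch 0 l)]

-- CORE: the running-run maxima over positions = per-distinct-character longest runs
lemma pvCore (j : Nat) : ∀ (l : List Char) (prev : Option Char) (run : Int) (L : List Char),
    (∀ c ∈ l, c ∈ L) → L.Nodup →
    pvM j prev run l
      = pvFmax (fun ch => if pvSlot ch = j then pvAux ch (if some ch = prev then run else 0) l else 0) L := by
  intro l
  induction l with
  | nil =>
    intro prev run L hsub hnd
    exact (pvFmax_zero L (fun ch _ => by simp [pvAux])).symm
  | cons c rest ih =>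
    intro prev run L hsub hnd
    have hcL : c ∈ L := hsub c List.mem_cons_self
    have hsub' : ∀ x ∈ rest, x ∈ L := fun x hx => hsub x (List.mem_cons_of_mem _ hx)
    simp only [pvM]
    rw [ih (some c) _ L hsub' hnd]
    symm
    apply pvFmax_split L hcL hnd
    · intro ch hch
      by_cases hs : pvSlot ch = j
      · have hcch : ¬ (c = ch) := fun h => hch h.symm
        have hchc : ¬ (some ch = some c) := by simpa using fun h => hch h
        simp only [hs, if_true, pvAux, hcch, if_false, hchc]
        exact max_eq_right (pvAux_nonneg ch 0 rest)
      · simp only [hs, if_false]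
    · by_cases hs : pvSlot c = j
      · simp only [hs, if_true, pvAux, if_pos rfl, Option.some.injEq]
        have hcarry : (if some c = prev then run else 0) + 1 = (if some c = prev then run + 1 else 1) := by
          split <;> ring
        rw [hcarry]
      · simp only [hs, if_false, max_self]

lemma pvRefT_getD (j : Nat) (hj : j < 26) : ∀ (l : List Char) (counts : List Int) (prev : Option Char) (run : Int),
    counts.length = 26 → (∀ c ∈ l, 39 ≤ c.toNat ∧ c.toNat ≤ 90) → 0 ≤ counts.getD j 0 →
    (pvRefT counts prev run l).getD j 0 = max (counts.getD j 0) (pvM j prev run l) := by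
  intro l
  induction l with
  | nil =>
    intro counts prev run hlen hrng hnn
    simp only [pvRefT, pvM]
    exact (max_eq_left hnn).symm
  | cons c rest ih =>
    intro counts prev run hlen hrng hnn
    have hc := hrng c List.mem_cons_self
    have hrest : ∀ x ∈ rest, 39 ≤ x.toNat ∧ x.toNat ≤ 90 :=
      fun x hx => hrng x (List.mem_cons_of_mem _ hx)
    obtain ⟨hidx, hslt⟩ := pv_slot hc
    simp only [pvRefT, pvM]
    by_cases hsj : pvSlot c = j
    · have hgd : (counts.set (pvSlot c) (max (counts.getD (pvSlot c) 0) (if some c = prev then run + 1 else 1))).getD j 0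
          = max (counts.getD j 0) (if some c = prev then run + 1 else 1) := by
        rw [hsj]; exact pv_getD_set counts (by omega) _
      rw [ih _ (some c) _ (by simp [hlen]) hrest (by rw [hgd]; exact le_max_of_le_left hnn), hgd,
        if_pos hsj, max_assoc]
    · have hgd : (counts.set (pvSlot c) (max (counts.getD (pvSlot c) 0) (if some c = prev then run + 1 else 1))).getD j 0
          = counts.getD j 0 := pv_getD_set_ne counts hsj _
      rw [ih _ (some c) _ (by simp [hlen]) hrest (hgd ▸ hnn), hgd, if_neg hsj,
        max_eq_right (pvM_nonneg j (some c) _ rest)]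

lemma pvApplyT_getD (j : Nat) (hj : j < 26) (s : List Char) : ∀ (chars : List Char) (counts : List Int),
    counts.length = 26 → (∀ c ∈ chars, 39 ≤ c.toNat ∧ c.toNat ≤ 90) → 0 ≤ counts.getD j 0 →
    (pvApplyT counts s chars).getD j 0
      = max (counts.getD j 0) (pvFmax (fun ch => if pvSlot ch = j then pvBest ch s else 0) chars) := by
  intro chars
  induction chars with
  | nil =>
    intro counts hlen hrng hnn
    simp only [pvApplyT, pvFmax]
    exact (max_eq_left hnn).symm
  | cons ch rest ih =>
    intro counts hlen hrng hnn
    have hc := hrng ch List.mem_cons_self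
    have hrest : ∀ x ∈ rest, 39 ≤ x.toNat ∧ x.toNat ≤ 90 :=
      fun x hx => hrng x (List.mem_cons_of_mem _ hx)
    obtain ⟨hidx, hslt⟩ := pv_slot hc
    simp only [pvApplyT, pvFmax]
    by_cases hsj : pvSlot ch = j
    · have hgd : (counts.set (pvSlot ch) (max (counts.getD (pvSlot ch) 0) (pvBest ch s))).getD j 0
          = max (counts.getD j 0) (pvBest ch s) := by
        rw [hsj]; exact pv_getD_set counts (by omega) _
      rw [ih _ (by simp [hlen]) hrest (by rw [hgd]; exact le_max_of_le_left hnn), hgd,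
        if_pos hsj, max_assoc]
    · have hgd : (counts.set (pvSlot ch) (max (counts.getD (pvSlot ch) 0) (pvBest ch s))).getD j 0
          = counts.getD j 0 := pv_getD_set_ne counts hsj _
      rw [ih _ (by simp [hlen]) hrest (hgd ▸ hnn), hgd, if_neg hsj,
        max_eq_right (pvFmax_nonneg _ rest)]

lemma pvRefT_length : ∀ (l : List Char) (counts : List Int) (prev : Option Char) (run : Int),
    (pvRefT counts prev run l).length = counts.length := by
  intro l
  induction l with
  | nil => intro counts prev run; rfl
  | cons c rest ih => intro counts prev run; simp only [pvRefT]; rw [ih]; simp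

lemma pvApplyT_length (s : List Char) : ∀ (chars : List Char) (counts : List Int),
    (pvApplyT counts s chars).length = counts.length := by
  intro chars
  induction chars with
  | nil => intro counts; rfl
  | cons ch rest ih => intro counts; simp only [pvApplyT]; rw [ih]; simp

-- the option loops compute the total versions on in-range characters
lemma pvRef_total : ∀ (l : List Char) (counts : List Int) (prev : Option Char) (run : Int),
    counts.length = 26 → (∀ c ∈ l, 39 ≤ c.toNat ∧ c.toNat ≤ 90) →
    pvRef counts prev run l = some (pvRefT counts prev run l) := by
  intro l
  induction l with
  | nil => intro counts prev run _ _; rfl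
  | cons c rest ih =>
    intro counts prev run hlen hrng
    have hc := hrng c List.mem_cons_self
    obtain ⟨hidx0, hslt⟩ := pv_slot hc
    have hidx : PySem.List.pyIdx? counts.length ((c.toNat : Int) - 65) = some (pvSlot c) := by
      rw [hlen]; exact hidx0
    have hj : pvSlot c < counts.length := by omega
    simp only [pvRef, pvRefT]
    rw [pv_get counts hj hidx]
    dsimp only
    rw [pv_step counts hj hidx]
    exact ih _ (some c) _ (by simp [hlen]) (fun x hx => hrng x (List.mem_cons_of_mem _ hx))

lemma pvLoopC_total (s : List Char) : ∀ (chars : List Char) (counts : List Int),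
    counts.length = 26 → (∀ c ∈ chars, 39 ≤ c.toNat ∧ c.toNat ≤ 90) →
    pvLoopC counts chars s = some (pvApplyT counts s chars) := by
  intro chars
  induction chars with
  | nil => intro counts _ _; rfl
  | cons ch rest ih =>
    intro counts hlen hrng
    have hc := hrng ch List.mem_cons_self
    obtain ⟨hidx0, hslt⟩ := pv_slot hc
    have hidx : PySem.List.pyIdx? counts.length ((ch.toNat : Int) - 65) = some (pvSlot ch) := by
      rw [hlen]; exact hidx0
    have hj : pvSlot ch < counts.length := by omega
    simp only [pvLoopC, pvApplyT]
    rw [pv_get counts hj hidx]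
    dsimp only
    rw [pv_set counts _ hidx]
    exact ih _ (by simp [hlen]) (fun x hx => hrng x (List.mem_cons_of_mem _ hx))

-- A's two-pointer loop equals the reference single pass (old lockstep invariant)
lemma pv_loop_eq : ∀ (rest pre cur : List Char) (c : Char) (countsA : List Int),
    countsA.length = 26 →
    cur ≠ [] → (∀ x ∈ cur, x = c) →
    (39 ≤ c.toNat ∧ c.toNat ≤ 90) →
    (∀ x ∈ rest, 39 ≤ x.toNat ∧ x.toNat ≤ 90) →
    pvLoopA (pre ++ cur ++ rest) (pre ++ cur ++ rest).length countsA pre.length (pre.length + cur.length)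
      = pvRef (PySem.List.pySetD countsA ((c.toNat : Int) - 65) (max (PySem.List.pyGetD countsA ((c.toNat : Int) - 65) 0) (cur.length : Int))) (some c) (cur.length : Int) rest := by
  intro rest
  induction rest with
  | nil =>
    intro pre cur c countsA hlen hne hall hc _
    have hm : 1 ≤ cur.length := List.length_pos_iff.mpr hne
    have hA : PySem.List.pyGet? (pre ++ cur ++ []) ((pre.length : Nat) : Int) = some c := by
      have h0 : cur[0]'(by omega) = c := hall _ (List.getElem_mem _)
      simp only [PySem.List.pyGet?_natCast, List.append_assoc]
      rw [List.getElem?_append_right (le_refl pre.length), Nat.sub_self,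
          List.getElem?_append_left (by omega), List.getElem?_eq_getElem (by omega), h0]
    obtain ⟨j, hj, hidx0⟩ := pv_idx 26 ((c.toNat : Int) - 65) (by omega) (by omega)
    have hj' : j < countsA.length := by omega
    have hidx : PySem.List.pyIdx? countsA.length ((c.toNat : Int) - 65) = some j := by
      rw [hlen]; exact hidx0
    rw [pvLoopA]
    rw [dif_pos (by refine ⟨?_, ?_⟩ <;> (simp only [List.length_append, List.length_nil]; omega))]
    rw [if_neg (by
      rintro ⟨hcon, -⟩
      simp only [List.length_append, List.length_nil] at hcon
      omega)]
    rw [hA]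
    dsimp only
    rw [pv_get countsA hj' hidx]
    dsimp only
    have harith : ((pre.length + cur.length : Nat) : Int) - ((pre.length : Nat) : Int) = (cur.length : Int) := by
      push_cast; ring
    rw [harith]
    rw [pvLoopA]
    rw [dif_neg (by
      rintro ⟨hcon, -⟩
      simp only [List.length_append, List.length_nil] at hcon
      omega)]
    rw [pvRef]
    rw [pv_step countsA hj' hidx, pv_set countsA _ hidx, pv_getD countsA hj' hidx]
  | cons d rest' ih =>
    intro pre cur c countsA hlen hne hall hc hrest
    have hm : 1 ≤ cur.length := List.length_pos_iff.mpr hne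
    have hd : 39 ≤ d.toNat ∧ d.toNat ≤ 90 := hrest d List.mem_cons_self
    have hrest' : ∀ x ∈ rest', 39 ≤ x.toNat ∧ x.toNat ≤ 90 :=
      fun x hx => hrest x (List.mem_cons_of_mem _ hx)
    have hA : PySem.List.pyGet? (pre ++ cur ++ (d :: rest')) ((pre.length : Nat) : Int) = some c := by
      have h0 : cur[0]'(by omega) = c := hall _ (List.getElem_mem _)
      simp only [PySem.List.pyGet?_natCast, List.append_assoc]
      rw [List.getElem?_append_right (le_refl pre.length), Nat.sub_self,
          List.getElem?_append_left (by omega), List.getElem?_eq_getElem (by omega), h0]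
    have hB : PySem.List.pyGet? (pre ++ cur ++ (d :: rest')) (((pre.length + cur.length : Nat)) : Int) = some d := by
      simp only [PySem.List.pyGet?_natCast, List.append_assoc]
      rw [List.getElem?_append_right (by omega)]
      have h1 : pre.length + cur.length - pre.length = cur.length := by omega
      rw [h1, List.getElem?_append_right (le_refl cur.length), Nat.sub_self]
      rfl
    obtain ⟨j, hj, hidx0⟩ := pv_idx 26 ((c.toNat : Int) - 65) (by omega) (by omega)
    have hj' : j < countsA.length := by omega
    have hidx : PySem.List.pyIdx? countsA.length ((c.toNat : Int) - 65) = some j := by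
      rw [hlen]; exact hidx0
    rw [pvLoopA]
    rw [dif_pos (by refine ⟨?_, ?_⟩ <;> (simp only [List.length_append, List.length_cons]; omega))]
    by_cases hcd : d = c
    · subst hcd
      rw [if_pos ⟨by simp only [List.length_append, List.length_cons]; omega, by rw [hA, hB]⟩]
      have hl : pre ++ cur ++ (d :: rest') = pre ++ (cur ++ [d]) ++ rest' := by simp
      have hidxlen : pre.length + cur.length + 1 = pre.length + (cur ++ [d]).length := by
        simp only [List.length_append, List.length_cons, List.length_nil]; omega
      rw [hl, hidxlen]
      rw [ih pre (cur ++ [d]) d countsA hlen (by simp) (by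
            intro x hx
            rcases List.mem_append.mp hx with h | h
            · exact hall x h
            · simpa using h) hc hrest']
      -- reduce the reference pass one step on the other side
      rw [pvRef]
      rw [if_pos rfl]
      set M := max (PySem.List.pyGetD countsA ((d.toNat : Int) - 65) 0) (cur.length : Int) with hM
      have hsetB : PySem.List.pySetD countsA ((d.toNat : Int) - 65) M = countsA.set j M :=
        pv_set countsA M hidx
      have hlenB : (PySem.List.pySetD countsA ((d.toNat : Int) - 65) M).length = countsA.length := by
        rw [hsetB]; simp
      have hidxB : PySem.List.pyIdx? (PySem.List.pySetD countsA ((d.toNat : Int) - 65) M).length ((d.toNat : Int) - 65) = some j := by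
        rw [hlenB]; exact hidx
      have hjB : j < (PySem.List.pySetD countsA ((d.toNat : Int) - 65) M).length := by
        rw [hlenB]; exact hj'
      rw [pv_get _ hjB hidxB]
      dsimp only
      rw [pv_step _ hjB hidxB]
      have hrunlen : (((cur ++ [d]).length : Nat) : Int) = (cur.length : Int) + 1 := by
        push_cast [List.length_append, List.length_cons, List.length_nil]; ring
      rw [hrunlen]
      rw [pv_set countsA _ hidx, hsetB]
      have hga : (countsA.set j M).getD j 0 = M := pv_getD_set countsA hj' M
      rw [hga, List.set_set, hM]
      rw [max_assoc, max_eq_right (show ((cur.length : Int)) ≤ (cur.length : Int) + 1 by omega)]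
    · rw [if_neg (by
        rintro ⟨-, heq⟩
        rw [hA, hB] at heq
        exact hcd (Option.some.inj heq).symm)]
      rw [hA]
      dsimp only
      rw [pv_get countsA hj' hidx]
      dsimp only
      have harith : ((pre.length + cur.length : Nat) : Int) - ((pre.length : Nat) : Int) = (cur.length : Int) := by
        push_cast; ring
      rw [harith, pv_step countsA hj' hidx]
      -- countsB, the state after A closes the run of c
      set countsB := countsA.set j (max (countsA.getD j 0) (cur.length : Int)) with hB'
      have hlenB : countsB.length = 26 := by rw [hB']; simp [hlen]
      -- view l with pre' = pre ++ cur, cur' = [d]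
      have hl : pre ++ cur ++ (d :: rest') = (pre ++ cur) ++ [d] ++ rest' := by simp
      have hlen1 : pre.length + cur.length = (pre ++ cur).length := by simp
      have hlen2 : (pre ++ cur).length + 1 = (pre ++ cur).length + [d].length := by simp
      rw [hl, hlen1, hlen2]
      rw [ih (pre ++ cur) [d] d countsB hlenB (by simp) (by simp) hd hrest']
      have h1d : ((([d] : List Char).length : Nat) : Int) = 1 := by simp
      rw [h1d]
      -- reduce the reference pass one step on the other side
      rw [pvRef]
      rw [if_neg (by simp [hcd])]
      rw [pv_set countsA _ hidx, pv_getD countsA hj' hidx, ← hB']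
      obtain ⟨jd, hjd, hidxd0⟩ := pv_idx 26 ((d.toNat : Int) - 65) (by omega) (by omega)
      have hjd' : jd < countsB.length := by omega
      have hidxd : PySem.List.pyIdx? countsB.length ((d.toNat : Int) - 65) = some jd := by
        rw [hlenB]; exact hidxd0
      rw [pv_get countsB hjd' hidxd]
      dsimp only
      rw [pv_step countsB hjd' hidxd]
      rw [pv_set countsB _ hidxd, pv_getD countsB hjd' hidxd]

-- the two final counts arrays coincide
lemma pv_counts_eq (l : List Char) (h : ∀ c ∈ l, 39 ≤ c.toNat ∧ c.toNat ≤ 90) :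
    pvRefT (List.replicate 26 0) none 0 l = pvApplyT (List.replicate 26 0) l (PySem.Set.ofList l) := by
  have hlenR : (pvRefT (List.replicate 26 0) none 0 l).length = 26 := by
    rw [pvRefT_length]; simp
  have hlenA : (pvApplyT (List.replicate 26 0) l (PySem.Set.ofList l)).length = 26 := by
    rw [pvApplyT_length]; simp
  apply List.ext_getElem (by rw [hlenR, hlenA])
  intro j h1 h2
  have hj : j < 26 := by omega
  have hrep : (List.replicate 26 (0 : Int)).getD j 0 = 0 := by
    rw [List.getD_eq_getElem?_getD, List.getElem?_replicate]
    simp [hj]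
  have hsub : ∀ c ∈ l, c ∈ PySem.Set.ofList l := fun c hc => (PySem.Set.mem_ofList l c).mpr hc
  have hrng' : ∀ c ∈ PySem.Set.ofList l, 39 ≤ c.toNat ∧ c.toNat ≤ 90 :=
    fun c hc => h c ((PySem.Set.mem_ofList l c).mp hc)
  have e1 : (pvRefT (List.replicate 26 0) none 0 l).getD j 0 = pvM j none 0 l := by
    rw [pvRefT_getD j hj l _ none 0 (by simp) h (by rw [hrep]), hrep,
      max_eq_right (pvM_nonneg j none 0 l)]
  have e2 : (pvApplyT (List.replicate 26 0) l (PySem.Set.ofList l)).getD j 0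
      = pvFmax (fun ch => if pvSlot ch = j then pvBest ch l else 0) (PySem.Set.ofList l) := by
    rw [pvApplyT_getD j hj l _ _ (by simp) hrng' (by rw [hrep]), hrep,
      max_eq_right (pvFmax_nonneg _ _)]
  have e3 : pvM j none 0 l
      = pvFmax (fun ch => if pvSlot ch = j then pvBest ch l else 0) (PySem.Set.ofList l) := by
    rw [pvCore j l none 0 (PySem.Set.ofList l) hsub (PySem.Set.nodup_ofList l)]
    apply pvFmax_congr
    intro ch _
    by_cases hs : pvSlot ch = j
    · simp only [hs, if_true]
      have : (if some ch = none then (0:Int) else 0) = 0 := by simp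
      rw [show (if (some ch = (none : Option Char)) then (0:Int) else 0) = 0 by simp,
        pvBest_eq_aux]
    · simp only [hs, if_false]
  have := e1.trans (e3.trans e2.symm)
  rw [List.getD_eq_getElem _ 0 (by omega), List.getD_eq_getElem _ 0 (by omega)] at this
  exact this

-- ===== VERDICT (by name: the statement is the Claim_ definition above) =====
theorem huaweilianxuzimulength_spec : Claim_equal_huaweilianxuzimulength := by
  intro s k hdom hpre
  have hchars : ∀ c ∈ s.toList, 39 ≤ c.toNat ∧ c.toNat ≤ 90 := by
    intro c hc
    have hall := hpre.1
    rw [List.all_eq_true] at hall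
    simpa using hall c hc
  have hk : -25 ≤ k := hpre.2
  unfold Spec_huaweilianxuzimulength huaweilianxuzimulength huaweilianxuzimulength_alt
  dsimp only
  cases hl : s.toList with
  | nil =>
    rw [if_pos rfl]
    rw [show PySem.Set.ofList ([] : List Char) = [] from rfl, pvLoopC]
    dsimp only
    by_cases hk26 : k > 26
    · rw [if_pos hk26]
    · rw [if_neg hk26]
      have hlen : (PySem.List.sorted (List.replicate 26 (0 : Int)) id true).length = 26 := by
        rw [PySem.List.length_sorted]; simp
      cases hg : PySem.List.pyGet? (PySem.List.sorted (List.replicate 26 (0 : Int)) id true) (k - 1) with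
      | none =>
        exfalso
        rw [PySem.List.pyGet?_eq_none_iff] at hg
        exact hg ⟨by rw [hlen]; push_cast; omega, by rw [hlen]; push_cast; omega⟩
      | some v =>
        have hv : v ∈ PySem.List.sorted (List.replicate 26 (0 : Int)) id true :=
          PySem.List.mem_of_pyGet?_eq_some _ hg
        rw [PySem.List.mem_sorted] at hv
        have hv0 := List.eq_of_mem_replicate hv
        dsimp only
        exact hv0.symm
  | cons c rest =>
    have hc : 39 ≤ c.toNat ∧ c.toNat ≤ 90 := by
      apply hchars; rw [hl]; exact List.mem_cons_self
    have hrest : ∀ x ∈ rest, 39 ≤ x.toNat ∧ x.toNat ≤ 90 := by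
      intro x hx; apply hchars; rw [hl]; exact List.mem_cons_of_mem _ hx
    have hcr : ∀ x ∈ (c :: rest), 39 ≤ x.toNat ∧ x.toNat ≤ 90 := by
      intro x hx
      rcases List.mem_cons.mp hx with rfl | hx'
      · exact hc
      · exact hrest x hx'
    rw [if_neg (by simp)]
    -- A side via the lockstep invariant, with pre = [], cur = [c]
    have hinv := pv_loop_eq rest [] [c] c (List.replicate 26 0) (by simp) (by simp) (by simp) hc hrest
    simp only [List.nil_append, List.singleton_append, List.length_nil, List.length_cons,
      Nat.zero_add, Nat.cast_one] at hinv
    obtain ⟨j, hj, hidx0⟩ := pv_idx 26 ((c.toNat : Int) - 65) (by omega) (by omega)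
    have hidx : PySem.List.pyIdx? (List.replicate 26 (0 : Int)).length ((c.toNat : Int) - 65) = some j := by
      simpa using hidx0
    have hj' : j < (List.replicate 26 (0 : Int)).length := by simpa using hj
    have hstepB : pvRef (List.replicate 26 0) none 0 (c :: rest)
        = pvRef (PySem.List.pySetD (List.replicate 26 0) ((c.toNat : Int) - 65)
            (max (PySem.List.pyGetD (List.replicate 26 0) ((c.toNat : Int) - 65) 0) 1)) (some c) 1 rest := by
      rw [pvRef]
      rw [if_neg (by simp)]
      rw [pv_get _ hj' hidx]
      dsimp only
      rw [pv_step _ hj' hidx]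
      rw [pv_set _ _ hidx, pv_getD _ hj' hidx]
    simp only [List.length_cons] at *
    rw [hinv, ← hstepB]
    rw [pvRef_total (c :: rest) _ none 0 (by simp) hcr]
    rw [pvLoopC_total (c :: rest) (PySem.Set.ofList (c :: rest)) _ (by simp)
      (fun x hx => hcr x ((PySem.Set.mem_ofList _ _).mp hx))]
    rw [pv_counts_eq (c :: rest) hcr]
    have hlenc : (pvApplyT (List.replicate 26 0) (c :: rest) (PySem.Set.ofList (c :: rest))).length = 26 := by
      rw [pvApplyT_length]; simp
    have hlens : PySem.List.len (PySem.List.sorted (pvApplyT (List.replicate 26 0) (c :: rest) (PySem.Set.ofList (c :: rest))) id true) = 26 := by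
      simp only [PySem.List.len, PySem.List.length_sorted, hlenc]; rfl
    dsimp only
    rw [hlens]
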